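-- pv_equiv track=rewrite | github.com/christofmuc/KnobKraft-orm | adaptions/Korg_03RW.py | escapeSysex
-- ===== SOURCE A (Python) =====
-- def escapeSysex(data):
--     result = []
--     dataIndex = 0
--     while dataIndex < len(data):
--         ms_bits = 0
--         for i in range(7):
--             if dataIndex + i < len(data):
--                 ms_bits = ms_bits | ((data[dataIndex + i] & 0x80) >> (7 - i))
--         result.append(ms_bits)
--         for i in range(7):
--             if dataIndex + i < len(data):
--                 result.append(data[dataIndex + i] & 0x7f)
--         dataIndex += 7
--     return result
-- ===== SOURCE B (Python) =====
-- def escapeSysex(data):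
--     result = []
--     header = -1
--     for pos, b in enumerate(data):
--         j = pos % 7
--         if j == 0:
--             header = len(result)
--             result.append(0)
--         result[header] |= (b & 0x80) >> (7 - j)
--         result.append(b & 0x7f)
--     return result
-- ===== Notes on version B (the rewrite author's own statement) =====
-- stated objective: alternative
-- what changed: B replaces A's chunked while-loop with two guarded inner range(7) passes by a single flat enumerate pass that appends a zero placeholder header byte at each group start and patches that slot in place (result[header] |= ...) as each byte streams by, so no chunk boundaries, inner loops or bounds checks remain.
import Mathlib
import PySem

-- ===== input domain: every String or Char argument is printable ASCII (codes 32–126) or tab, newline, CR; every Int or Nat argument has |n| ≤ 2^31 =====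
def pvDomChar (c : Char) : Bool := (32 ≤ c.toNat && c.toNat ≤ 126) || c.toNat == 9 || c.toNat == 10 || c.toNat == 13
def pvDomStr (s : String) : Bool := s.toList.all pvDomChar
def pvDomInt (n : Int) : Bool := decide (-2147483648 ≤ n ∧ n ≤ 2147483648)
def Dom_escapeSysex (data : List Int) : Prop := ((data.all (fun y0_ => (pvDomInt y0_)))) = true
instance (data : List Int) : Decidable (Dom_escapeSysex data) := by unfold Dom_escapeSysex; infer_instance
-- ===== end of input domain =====

-- B replaces A's chunked while-loop (two guarded inner range(7) passes) by a single flat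
-- enumerate pass that appends a placeholder header byte at each group start and patches it
-- in place as bytes stream by (objective: alternative).

-- ===== PORT A =====
-- while dataIndex < len(data): … ; dataIndex += 7   (tail recursion on dataIndex)
def escapeSysexGo (data : List Int) (dataIndex : Int) (result : List Int) : List Int :=
  if h : dataIndex < (data.length : Int) then
    let ms_bits := (PySem.List.pyRange 0 7 1).foldl
      (fun m i => if dataIndex + i < (data.length : Int) then
          PySem.Int.bor m ((PySem.Int.band (PySem.List.pyGetD data (dataIndex + i) 0) 0x80) >>> (7 - i).toNat)
        else m) 0
    let result1 := result ++ [ms_bits]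
    let result2 := (PySem.List.pyRange 0 7 1).foldl
      (fun r i => if dataIndex + i < (data.length : Int) then
          r ++ [PySem.Int.band (PySem.List.pyGetD data (dataIndex + i) 0) 0x7f]
        else r) result1
    escapeSysexGo data (dataIndex + 7) result2
  else result
termination_by ((data.length : Int) - dataIndex).toNat
decreasing_by omega

def escapeSysex (data : List Int) : List Int :=
  escapeSysexGo data 0 []

-- ===== PORT B =====
-- loop body: j = pos % 7; if j == 0: header = len(result); result.append(0);
--            result[header] |= (b & 0x80) >> (7 - j); result.append(b & 0x7f)
-- result[header] |= x is ported with pyGetD/pySetD (header is always a valid nonnegative index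
-- when reached, since the j == 0 branch has set it).
def altStep (st : List Int × Int) (pb : Int × Int) : List Int × Int :=
  let j := PySem.Int.mod pb.1 7
  let st' := if j = 0 then (st.1 ++ [(0 : Int)], (st.1.length : Int)) else st
  (PySem.List.pySetD st'.1 st'.2
      (PySem.Int.bor (PySem.List.pyGetD st'.1 st'.2 0)
        ((PySem.Int.band pb.2 0x80) >>> (7 - j).toNat))
    ++ [PySem.Int.band pb.2 0x7f], st'.2)

def escapeSysex_alt (data : List Int) : List Int :=
  ((PySem.List.enumerate data 0).foldl altStep ([], -1)).1

-- ===== PRECONDITION & SPEC =====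
def Spec_escapeSysex (data : List Int) (out : List Int) : Prop := out = escapeSysex_alt data
instance (data : List Int) (out : List Int) : Decidable (Spec_escapeSysex data out) := by unfold Spec_escapeSysex; infer_instance

-- ===== CLAIM (what is proved, stated in full; the proofs are below) =====
def Claim_equal_escapeSysex : Prop := ∀ (data : List Int), Dom_escapeSysex data → Spec_escapeSysex data (escapeSysex data)

-- ===== LEMMAS AND PROOFS =====

-- common reference: one encoded group per 7-byte chunk
def msbChunk (chunk : List Int) : Int :=
  (PySem.List.enumerate chunk 0).foldl
    (fun m p => PySem.Int.bor m ((PySem.Int.band p.2 0x80) >>> (7 - p.1).toNat)) 0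

def specRec (l : List Int) : List Int :=
  if l = [] then [] else
    (msbChunk (l.take 7) :: (l.take 7).map (fun b => PySem.Int.band b 0x7f)) ++ specRec (l.drop 7)
termination_by l.length
decreasing_by
  rename_i h
  have : l.length ≠ 0 := fun h0 => h (List.eq_nil_of_length_eq_zero h0)
  simp [List.length_drop]; omega

-- ---- A side ----

-- A's guarded MSB loop over range(c,7), reading data[dataIndex+i], equals the enumerate-fold
-- over the corresponding tail chunk (data.drop (n.toNat+c)).take (7-c).
theorem genA (data : List Int) (n : Int) (hn : 0 ≤ n) (c : Nat) (hc : c ≤ 7) (m : Int) :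
  (PySem.List.pyRange c 7 1).foldl
    (fun m i => if n + i < (data.length:Int) then
        PySem.Int.bor m ((PySem.Int.band (PySem.List.pyGetD data (n + i) 0) 0x80) >>> (7 - i).toNat)
      else m) m
  = (PySem.List.enumerate ((data.drop (n.toNat + c)).take (7-c)) c).foldl
      (fun m p => PySem.Int.bor m ((PySem.Int.band p.2 0x80) >>> (7 - p.1).toNat)) m := by
  by_cases h7 : c = 7
  · subst h7
    simp [PySem.List.pyRange_one_eq_nil, PySem.List.enumerate_nil]
  · have hlt : (c:Int) < 7 := by omega
    rw [PySem.List.pyRange_one_cons hlt]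
    simp only [List.foldl_cons]
    by_cases hs : n.toNat + c < data.length
    · have hidx : n + (c:Int) = ((n.toNat + c : Nat) : Int) := by omega
      have hget : PySem.List.pyGetD data (n + (c:Int)) 0 = data[n.toNat + c] := by
        rw [hidx]; exact PySem.List.pyGetD_ofNat data _ 0 hs
      have hcond : (n + (c:Int) < (data.length:Int)) := by omega
      rw [if_pos hcond, hget]
      have hdrop : data.drop (n.toNat + c) = data[n.toNat + c] :: data.drop (n.toNat + (c+1)) := by
        rw [List.drop_eq_getElem_cons hs]
        rw [Nat.add_assoc]
      have htake : (data.drop (n.toNat + c)).take (7-c)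
          = data[n.toNat + c] :: (data.drop (n.toNat + (c+1))).take (7-(c+1)) := by
        rw [hdrop]
        have : 7 - c = (7 - (c+1)) + 1 := by omega
        rw [this, List.take_succ_cons]
      rw [htake, PySem.List.enumerate_cons, List.foldl_cons]
      have := genA data n hn (c+1) (by omega)
        (PySem.Int.bor m ((PySem.Int.band data[n.toNat + c] 0x80) >>> (7 - (c:Int)).toNat))
      rw [show ((c:Int)+1) = ((c+1:Nat):Int) by push_cast; ring]
      convert this using 3
      exact Int.shiftRight_natCast_right _ _
    · have hcond : ¬ (n + (c:Int) < (data.length:Int)) := by omega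
      rw [if_neg hcond]
      have hdrop : data.drop (n.toNat + c) = [] := by
        rw [List.drop_eq_nil_iff]; omega
      have hdrop1 : data.drop (n.toNat + (c+1)) = [] := by
        rw [List.drop_eq_nil_iff]; omega
      have := genA data n hn (c+1) (by omega) m
      rw [hdrop1] at this
      rw [hdrop]
      simpa [PySem.List.enumerate_nil] using this

-- A's guarded low-byte append loop over range(c,7) equals appending the mapped chunk.
theorem genB (data : List Int) (n : Int) (hn : 0 ≤ n) (c : Nat) (hc : c ≤ 7) (r : List Int) :
  (PySem.List.pyRange c 7 1).foldl
    (fun r i => if n + i < (data.length:Int) then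
        r ++ [PySem.Int.band (PySem.List.pyGetD data (n + i) 0) 0x7f]
      else r) r
  = r ++ ((data.drop (n.toNat + c)).take (7-c)).map (fun b => PySem.Int.band b 0x7f) := by
  by_cases h7 : c = 7
  · subst h7
    simp [PySem.List.pyRange_one_eq_nil]
  · have hlt : (c:Int) < 7 := by omega
    rw [PySem.List.pyRange_one_cons hlt]
    simp only [List.foldl_cons]
    by_cases hs : n.toNat + c < data.length
    · have hidx : n + (c:Int) = ((n.toNat + c : Nat) : Int) := by omega
      have hget : PySem.List.pyGetD data (n + (c:Int)) 0 = data[n.toNat + c] := by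
        rw [hidx]; exact PySem.List.pyGetD_ofNat data _ 0 hs
      have hcond : (n + (c:Int) < (data.length:Int)) := by omega
      rw [if_pos hcond, hget]
      have hdrop : data.drop (n.toNat + c) = data[n.toNat + c] :: data.drop (n.toNat + (c+1)) := by
        rw [List.drop_eq_getElem_cons hs]
        rw [Nat.add_assoc]
      have htake : (data.drop (n.toNat + c)).take (7-c)
          = data[n.toNat + c] :: (data.drop (n.toNat + (c+1))).take (7-(c+1)) := by
        rw [hdrop]
        have : 7 - c = (7 - (c+1)) + 1 := by omega
        rw [this, List.take_succ_cons]
      rw [htake]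
      have := genB data n hn (c+1) (by omega) (r ++ [PySem.Int.band data[n.toNat + c] 0x7f])
      rw [show ((c:Int)+1) = ((c+1:Nat):Int) by push_cast; ring]
      rw [this]
      simp
    · have hcond : ¬ (n + (c:Int) < (data.length:Int)) := by omega
      rw [if_neg hcond]
      have hdrop : data.drop (n.toNat + c) = [] := by
        rw [List.drop_eq_nil_iff]; omega
      have hdrop1 : data.drop (n.toNat + (c+1)) = [] := by
        rw [List.drop_eq_nil_iff]; omega
      have := genB data n hn (c+1) (by omega) r
      rw [hdrop1] at this
      rw [hdrop]
      simpa using this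

-- A's loop from dataIndex = n appends the encoding of the remaining suffix.
theorem keyA (data : List Int) (k : Nat) :
    ∀ (n : Int), 0 ≤ n → ((data.length:Int) - n).toNat = k →
    ∀ res, escapeSysexGo data n res = res ++ specRec (data.drop n.toNat) := by
  induction k using Nat.strong_induction_on with
  | _ k IH =>
    intro n hn hk res
    rw [escapeSysexGo]
    by_cases h : n < (data.length:Int)
    · rw [dif_pos h]
      have hms := genA data n hn 0 (by omega) 0
      have hlow := genB data n hn 0 (by omega) (res ++ [msbChunk ((data.drop n.toNat).take 7)])
      simp only [Nat.cast_zero, add_zero, Nat.sub_zero] at hms hlow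
      rw [hms]
      show escapeSysexGo data (n+7) _ = _
      rw [show (PySem.List.enumerate ((data.drop n.toNat).take 7) 0).foldl
            (fun m p => PySem.Int.bor m ((PySem.Int.band p.2 0x80) >>> (7 - p.1).toNat)) 0
          = msbChunk ((data.drop n.toNat).take 7) from rfl, hlow]
      have hIH := IH (((data.length:Int) - (n+7)).toNat) (by omega) (n+7) (by omega) rfl
        (res ++ [msbChunk ((data.drop n.toNat).take 7)]
             ++ ((data.drop n.toNat).take 7).map (fun b => PySem.Int.band b 0x7f))
      rw [hIH]
      have hdd : (data.drop n.toNat).drop 7 = data.drop ((n+7).toNat) := by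
        rw [List.drop_drop]
        congr 1
        omega
      have hne : data.drop n.toNat ≠ [] := by
        intro h0
        have := List.drop_eq_nil_iff.mp h0
        omega
      conv_rhs => rw [specRec, if_neg hne]
      rw [hdd]
      simp
    · rw [dif_neg h]
      have hnil : data.drop n.toNat = [] := by
        rw [List.drop_eq_nil_iff]; omega
      rw [hnil, specRec]
      simp

-- ---- B side ----

-- positions 7*q + j with 1 ≤ j reduce mod 7 to j
theorem mod7_eq (q : Int) (j : Nat) (_hq : 0 ≤ q) (hj : j < 7) :
    PySem.Int.mod (7*q + (j:Int)) 7 = (j:Int) := by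
  simp only [PySem.Int.mod, Int.fmod_eq_emod]
  norm_num
  omega

-- patching the header slot: the slot sits right after res
theorem patch_set (res lows : List Int) (m v : Int) :
    PySem.List.pySetD (res ++ m :: lows) ((res.length : Int)) v = res ++ v :: lows := by
  rw [show ((res.length : Int)) = ((res.length : Nat) : Int) from rfl, PySem.List.pySetD_natCast]
  simp

theorem patch_get (res lows : List Int) (m : Int) :
    PySem.List.pyGetD (res ++ m :: lows) ((res.length : Int)) 0 = m := by
  have : res.length < (res ++ m :: lows).length := by simp
  rw [show ((res.length : Int)) = ((res.length : Nat) : Int) from rfl,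
      PySem.List.pyGetD_ofNat _ _ _ this]
  simp

-- within a chunk (positions 7q+j, 1 ≤ j, no mod rollover) B's flat steps OR bits into the
-- header slot and append low bytes
theorem keyB_inner (rest : List Int) : ∀ (j : Nat), 1 ≤ j → j + rest.length ≤ 7 →
    ∀ (q : Int), 0 ≤ q → ∀ (res lows : List Int) (m : Int),
    (PySem.List.enumerate rest (7*q + (j:Int))).foldl altStep (res ++ m :: lows, (res.length : Int))
    = (res ++ ((PySem.List.enumerate rest (j:Int)).foldl
          (fun m p => PySem.Int.bor m ((PySem.Int.band p.2 0x80) >>> (7 - p.1).toNat)) m)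
        :: (lows ++ rest.map (fun b => PySem.Int.band b 0x7f)), (res.length : Int)) := by
  induction rest with
  | nil => intro j _ _ q _ res lows m; simp [PySem.List.enumerate_nil]
  | cons b rest ih =>
    intro j hj1 hj7 q hq res lows m
    rw [PySem.List.enumerate_cons, PySem.List.enumerate_cons, List.foldl_cons, List.foldl_cons]
    have hmod : PySem.Int.mod (7*q + (j:Int)) 7 = (j:Int) := mod7_eq q j hq (by simp at hj7; omega)
    have hstep : altStep (res ++ m :: lows, (res.length : Int)) (7*q + (j:Int), b)
        = (res ++ (PySem.Int.bor m ((PySem.Int.band b 0x80) >>> (7 - (j:Int)).toNat))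
            :: (lows ++ [PySem.Int.band b 0x7f]), (res.length : Int)) := by
      unfold altStep
      simp only [hmod]
      rw [if_neg (by simp; omega)]
      simp only
      rw [patch_get, patch_set]
      simp
    rw [hstep]
    have := ih (j+1) (by omega) (by simp at hj7 ⊢; omega) q hq res
      (lows ++ [PySem.Int.band b 0x7f])
      (PySem.Int.bor m ((PySem.Int.band b 0x80) >>> (7 - (j:Int)).toNat))
    rw [show (7*q + (j:Int)) + 1 = 7*q + ((j+1:Nat):Int) by push_cast; ring,
        show ((j:Int)) + 1 = ((j+1:Nat):Int) by push_cast; ring, this]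
    simp only [List.map_cons, List.append_assoc, List.singleton_append]
    rw [Int.shiftRight_natCast_right]

-- B's flat fold over the whole remaining list, starting at a group boundary, produces specRec
theorem keyB (k : Nat) : ∀ (l : List Int), l.length = k → ∀ (q : Int), 0 ≤ q →
    ∀ (res : List Int) (h : Int),
    ((PySem.List.enumerate l (7*q)).foldl altStep (res, h)).1 = res ++ specRec l := by
  induction k using Nat.strong_induction_on with
  | _ k IH =>
    intro l hl q hq res h
    match l with
    | [] => simp [PySem.List.enumerate_nil, specRec]
    | b :: rest =>
      rw [PySem.List.enumerate_cons, List.foldl_cons]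
      have hmod : PySem.Int.mod (7*q) 7 = 0 := by
        simp [PySem.Int.mod]
      have hstep : altStep (res, h) (7*q, b)
          = (res ++ (PySem.Int.bor 0 ((PySem.Int.band b 0x80) >>> ((7:Int) - 0).toNat))
              :: [PySem.Int.band b 0x7f], (res.length : Int)) := by
        unfold altStep
        simp only [hmod, if_true]
        rw [show res ++ [(0:Int)] = res ++ (0:Int) :: [] from rfl, patch_get, patch_set]
        simp only [List.append_assoc, List.cons_append, List.nil_append]
      rw [hstep]
      -- split rest into the remainder of this chunk and the later chunks
      have hsplit : rest = rest.take 6 ++ rest.drop 6 := (List.take_append_drop 6 rest).symm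
      conv_lhs => rw [hsplit]
      rw [PySem.List.enumerate_append, List.foldl_append]
      have hlen6 : (rest.take 6).length = min 6 rest.length := by simp
      have hinner := keyB_inner (rest.take 6) 1 (by omega) (by simp; omega) q hq res
        [PySem.Int.band b 0x7f] (PySem.Int.bor 0 ((PySem.Int.band b 0x80) >>> ((7:Int) - 0).toNat))
      simp only [Nat.cast_one] at hinner
      rw [hinner]
      have hms : (PySem.List.enumerate (rest.take 6) (1:Int)).foldl
            (fun m p => PySem.Int.bor m ((PySem.Int.band p.2 0x80) >>> (7 - p.1).toNat))
            (PySem.Int.bor 0 ((PySem.Int.band b 0x80) >>> ((7:Int) - 0).toNat))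
          = msbChunk ((b :: rest).take 7) := by
        unfold msbChunk
        rw [show (b :: rest).take 7 = b :: rest.take 6 from rfl, PySem.List.enumerate_cons,
            List.foldl_cons]
        norm_num [Int.shiftRight_natCast_right]
        rw [show Int.toNat 7 = 7 from rfl]
        conv_rhs => rw [show PySem.Int.band b 128 >>> (7:Int)
          = PySem.Int.band b 128 >>> ((7:Nat):Int) from rfl]
        rw [Int.shiftRight_natCast_right]
      rw [hms]
      by_cases hlong : rest.length ≤ 6
      · have hdrop6 : rest.drop 6 = [] := by rw [List.drop_eq_nil_iff]; omega
        rw [hdrop6]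
        simp only [PySem.List.enumerate_nil, List.foldl_nil]
        conv_rhs => rw [specRec, if_neg (by simp : (b :: rest) ≠ [])]
        have hd7 : (b :: rest).drop 7 = [] := by rw [List.drop_eq_nil_iff]; simp; omega
        have ht7 : (b :: rest).take 7 = b :: rest.take 6 := rfl
        rw [hd7, ht7, specRec]
        simp [List.take_of_length_le hlong]
      · have h6 : (rest.take 6).length = 6 := by simp; omega
        have hstart : 7*q + 1 + ((rest.take 6).length : Int) = 7*(q+1) := by
          rw [h6]; push_cast; ring
        rw [hstart]
        have hlk : (rest.drop 6).length < k := by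
          have h' := hl
          simp only [List.length_cons] at h'
          simp only [List.length_drop]
          omega
        have hIH := IH ((rest.drop 6).length) hlk (rest.drop 6) rfl
          (q+1) (by omega)
          (res ++ msbChunk ((b :: rest).take 7)
            :: (PySem.Int.band b 0x7f :: (rest.take 6).map (fun b => PySem.Int.band b 0x7f)))
          ((res.length : Int))
        rw [show [PySem.Int.band b 0x7f] ++ (rest.take 6).map (fun b => PySem.Int.band b 0x7f)
            = PySem.Int.band b 0x7f :: (rest.take 6).map (fun b => PySem.Int.band b 0x7f) from rfl]
        rw [hIH]
        conv_rhs => rw [specRec, if_neg (by simp : (b :: rest) ≠ [])]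
        have ht7 : (b :: rest).take 7 = b :: rest.take 6 := rfl
        have hd7 : (b :: rest).drop 7 = rest.drop 6 := rfl
        rw [ht7, hd7]
        simp

-- ===== VERDICT (by name: the statement is the Claim_ definition above) =====
theorem escapeSysex_spec : Claim_equal_escapeSysex := by
  intro data _
  unfold Spec_escapeSysex escapeSysex escapeSysex_alt
  rw [keyA data ((data.length:Int) - 0).toNat 0 le_rfl rfl []]
  rw [show (0:Int) = 7*0 from rfl, keyB data.length data rfl 0 le_rfl [] (-1)]
  simp
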